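-- pv_equiv track=rewrite | github.com/Boodoochai/My-Learning-Tracker | Coaching-Sessions/sbori_polufinal_icpc_2023/30-11-2023/K.py | is_equal_draw
-- ===== SOURCE A (Python) =====
-- def is_equal_draw(draw_a: list[list[str]], draw_b: list[list[str]]) -> tuple[int, int, int, int, bool]:
--     x1 = 0
--     y1 = 0
--     x2 = 0
--     y2 = 0
--     ffl = 0
--     for i in range(len(draw_a)):
--         if ffl == 1:
--             break
--         for j in range(len(draw_a[0])):
--             if draw_a[i][j] == '*':
--                 x1 = i
--                 y1 = j
--                 ffl = 1
--                 break
--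
--     ffl = 0
--     for i in range(len(draw_b)):
--         if ffl == 1:
--             break
--         for j in range(len(draw_b[0])):
--             if draw_b[i][j] == '*':
--                 x2 = i
--                 y2 = j
--                 ffl = 1
--                 break
--
--     new_x_len = max(len(draw_a) + x2, len(draw_b) + x1)
--     new_y_len = max(len(draw_a[0]) + y2, (len(draw_b[0]) + y1))
--
--     new_draw_a = [['.'] * new_y_len for i in range(new_x_len)]
--     new_draw_b = [['.'] * new_y_len for i in range(new_x_len)]
--
--     for i in range(len(draw_a)):
--         for j in range(len(draw_a[0])):
--             new_draw_a[i + x2][j + y2] = draw_a[i][j]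
--
--     for i in range(len(draw_b)):
--         for j in range(len(draw_b[0])):
--             new_draw_b[i + x1][j + y1] = draw_b[i][j]
--
--     for i in range(new_x_len):
--         for j in range(new_y_len):
--             if new_draw_a[i][j] != new_draw_b[i][j]:
--                 return -1, -1, -1, -1, False
--
--     return x1, y1, x2, y2, True
-- ===== SOURCE B (Python) =====
-- def is_equal_draw(draw_a: list[list[str]], draw_b: list[list[str]]) -> tuple[int, int, int, int, bool]:
--     la, wa = len(draw_a), len(draw_a[0])
--     lb, wb = len(draw_b), len(draw_b[0])
--
--     def first_star(grid, w):
--         # row-major position of the first '*' inside the grid's w-column frame; (0, 0) if none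
--         for i, row in enumerate(grid):
--             try:
--                 return i, row.index('*', 0, w)
--             except ValueError:
--                 pass
--         return 0, 0
--
--     x1, y1 = first_star(draw_a, wa)
--     x2, y2 = first_star(draw_b, wb)
--     dx, dy = x2 - x1, y2 - y1  # the b-cell aligned with a-cell (i, j) is b[i + dx][j + dy]
--     for i in range(la):
--         for j in range(wa):
--             bi, bj = i + dx, j + dy
--             other = draw_b[bi][bj] if 0 <= bi < lb and 0 <= bj < wb else '.'
--             if draw_a[i][j] != other:
--                 return -1, -1, -1, -1, False
--     for i in range(lb):
--         for j in range(wb):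
--             ai, aj = i - dx, j - dy
--             if not (0 <= ai < la and 0 <= aj < wa) and draw_b[i][j] != '.':
--                 return -1, -1, -1, -1, False
--     return x1, y1, x2, y2, True
-- ===== Notes on version B (the rewrite author's own statement) =====
-- stated objective: faster
-- what changed: B finds each drawing's first '*' per row with list.index and compares the two drawings in place over the aligned cells (each cell of a against its counterpart in b or '.', plus b's cells outside a's frame against '.'), instead of materializing two '.'-padded union-size canvases and scanning every canvas cell.
import Mathlib
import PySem

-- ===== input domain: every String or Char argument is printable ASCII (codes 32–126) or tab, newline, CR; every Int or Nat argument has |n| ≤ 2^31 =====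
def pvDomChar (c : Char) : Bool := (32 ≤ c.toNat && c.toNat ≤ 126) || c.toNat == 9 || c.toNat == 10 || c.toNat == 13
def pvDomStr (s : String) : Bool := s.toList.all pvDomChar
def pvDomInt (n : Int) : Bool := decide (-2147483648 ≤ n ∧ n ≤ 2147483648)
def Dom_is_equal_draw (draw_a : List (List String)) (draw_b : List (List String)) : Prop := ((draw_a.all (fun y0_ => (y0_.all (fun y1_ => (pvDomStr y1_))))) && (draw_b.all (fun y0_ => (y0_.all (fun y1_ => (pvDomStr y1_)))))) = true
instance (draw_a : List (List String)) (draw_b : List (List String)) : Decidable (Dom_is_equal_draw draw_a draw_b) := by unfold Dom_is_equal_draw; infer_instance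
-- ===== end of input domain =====

-- B compares the two drawings in place, aligned at their first '*', instead of materializing
-- and scanning two '.'-padded union grids: asymptotically fewer cells touched.
-- (Equivalence is about the return value; neither version mutates its arguments.)

-- ===== PORT A =====

-- reading g[i][j]: always in range under Pre_; "." is an arbitrary out-of-range placeholder
def pvCell (g : List (List String)) (i j : Nat) : String := (g.getD i []).getD j "."

-- inner 'for j in range(w): if row[j] == '*': break'
def pvRowStarA (row : List String) (w j : Nat) : Option Nat :=
  if _h : j < w then
    if row.getD j "." = "*" then some j else pvRowStarA row w (j+1)
  else none
termination_by w - j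

-- outer 'for i in range(len(g))' with the ffl early-exit flag
def pvGridStarA (g : List (List String)) (w i : Nat) : Nat × Nat :=
  if _h : i < g.length then
    match pvRowStarA (g.getD i []) w 0 with
    | some j => (i, j)
    | none => pvGridStarA g w (i+1)
  else (0, 0)
termination_by g.length - i

-- 'new_draw[p][q] = v'
def pvWrite (g : List (List String)) (p q : Nat) (v : String) : List (List String) :=
  g.modify p (fun row => row.set q v)

-- 'for i in range(l): for j in range(w): new_draw[i+dx][j+dy] = src[i][j]'
def pvPaint (dst src : List (List String)) (l w dx dy : Nat) : List (List String) :=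
  (List.range l).foldl (fun g i =>
    (List.range w).foldl (fun g j => pvWrite g (i+dx) (j+dy) (pvCell src i j)) g) dst

def is_equal_draw (draw_a : List (List String)) (draw_b : List (List String)) : Int × Int × Int × Int × Bool :=
  let wa := (draw_a.getD 0 []).length
  let wb := (draw_b.getD 0 []).length
  let s1 := pvGridStarA draw_a wa 0
  let s2 := pvGridStarA draw_b wb 0
  let X := max (draw_a.length + s2.1) (draw_b.length + s1.1)
  let Y := max (wa + s2.2) (wb + s1.2)
  let na := pvPaint (List.replicate X (List.replicate Y ".")) draw_a draw_a.length wa s2.1 s2.2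
  let nb := pvPaint (List.replicate X (List.replicate Y ".")) draw_b draw_b.length wb s1.1 s1.2
  -- final double loop with early 'return -1,-1,-1,-1,False'
  if (List.range X).all (fun i => (List.range Y).all (fun j => pvCell na i j == pvCell nb i j))
  then ((s1.1 : Int), (s1.2 : Int), (s2.1 : Int), (s2.2 : Int), true)
  else (-1, -1, -1, -1, false)

-- ===== PORT B =====

-- B's first_star: per row, 'row.index('*', 0, w)' caught with try/except
def pvStarB (w i : Nat) : List (List String) → Nat × Nat
  | [] => (0, 0)
  | row :: rest =>
    match PySem.List.index? (row.take w) "*" with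
    | some j => (i, j)
    | none => pvStarB w (i+1) rest

-- "draw_b[bi][bj] if 0 <= bi < lb and 0 <= bj < wb else '.'"
def pvOther (b : List (List String)) (lb wb : Nat) (bi bj : Int) : String :=
  if 0 ≤ bi ∧ bi < (lb : Int) ∧ 0 ≤ bj ∧ bj < (wb : Int) then pvCell b bi.toNat bj.toNat else "."

def is_equal_draw_alt (draw_a : List (List String)) (draw_b : List (List String)) : Int × Int × Int × Int × Bool :=
  let la := draw_a.length
  let wa := (draw_a.getD 0 []).length
  let lb := draw_b.length
  let wb := (draw_b.getD 0 []).length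
  let s1 := pvStarB wa 0 draw_a
  let s2 := pvStarB wb 0 draw_b
  let dx : Int := (s2.1 : Int) - (s1.1 : Int)
  let dy : Int := (s2.2 : Int) - (s1.2 : Int)
  if ((List.range la).all (fun i => (List.range wa).all (fun j =>
        pvCell draw_a i j == pvOther draw_b lb wb ((i : Int) + dx) ((j : Int) + dy)))
      && (List.range lb).all (fun i => (List.range wb).all (fun j =>
        decide (0 ≤ (i : Int) - dx ∧ (i : Int) - dx < (la : Int) ∧ 0 ≤ (j : Int) - dy ∧ (j : Int) - dy < (wa : Int))
        || (pvCell draw_b i j == "."))))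
  then ((s1.1 : Int), (s1.2 : Int), (s2.1 : Int), (s2.2 : Int), true)
  else (-1, -1, -1, -1, false)

-- ===== PRECONDITION & SPEC =====
-- Pre_ is exactly the set of inputs on which the Python A returns: each drawing is nonempty and
-- no row is shorter than its first row (otherwise len(draw[0]) / draw[i][j] raises IndexError).
def Pre_is_equal_draw (draw_a : List (List String)) (draw_b : List (List String)) : Prop :=
  draw_a ≠ [] ∧ draw_b ≠ [] ∧
  (∀ r ∈ draw_a, (draw_a.headD []).length ≤ r.length) ∧
  (∀ r ∈ draw_b, (draw_b.headD []).length ≤ r.length)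
instance (draw_a : List (List String)) (draw_b : List (List String)) : Decidable (Pre_is_equal_draw draw_a draw_b) := by unfold Pre_is_equal_draw; infer_instance

def pvWitness_is_equal_draw : List (List String) × List (List String) := ([[".", "*"]], [["*", "#"]])

def Spec_is_equal_draw (draw_a : List (List String)) (draw_b : List (List String)) (out : Int × Int × Int × Int × Bool) : Prop := out = is_equal_draw_alt draw_a draw_b
instance (draw_a : List (List String)) (draw_b : List (List String)) (out : Int × Int × Int × Int × Bool) : Decidable (Spec_is_equal_draw draw_a draw_b out) := by unfold Spec_is_equal_draw; infer_instance

-- ===== CLAIM (what is proved, stated in full; the proofs are below) =====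
def Claim_equal_is_equal_draw : Prop := ∀ (draw_a : List (List String)) (draw_b : List (List String)), Dom_is_equal_draw draw_a draw_b → Pre_is_equal_draw draw_a draw_b → Spec_is_equal_draw draw_a draw_b (is_equal_draw draw_a draw_b)

-- ===== LEMMAS AND PROOFS =====

-- the two star searches agree
theorem rowStarA_eq (row : List String) (w : Nat) :
    ∀ j, pvRowStarA row w j = (List.idxOf? "*" ((row.take w).drop j)).map (· + j) := by
  suffices h : ∀ n j, w - j = n → pvRowStarA row w j = (List.idxOf? "*" ((row.take w).drop j)).map (· + j) from
    fun j => h (w - j) j rfl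
  intro n
  induction n with
  | zero =>
    intro j hj
    have hjw : ¬ j < w := by omega
    rw [pvRowStarA, dif_neg hjw]
    rw [List.drop_eq_nil_of_le (by simp [List.length_take]; omega)]
    rfl
  | succ n ih =>
    intro j hj
    have hjw : j < w := by omega
    rw [pvRowStarA, dif_pos hjw]
    by_cases hjr : j < row.length
    · have hjt : j < (row.take w).length := by simp [List.length_take]; omega
      rw [List.drop_eq_getElem_cons hjt, List.idxOf?_cons, List.getElem_take]
      rw [List.getD_eq_getElem row "." hjr]
      by_cases hstar : row[j] = "*"
      · rw [if_pos hstar, if_pos (by simp [hstar])]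
        simp
      · rw [if_neg hstar, if_neg (by simpa using hstar), ih (j+1) (by omega)]
        simp only [Option.map_map]
        congr 1
        funext x
        simp only [Function.comp_apply]
        omega
    · have h1 : row.getD j "." = "." := List.getD_eq_default _ _ (by omega)
      rw [h1, if_neg (by decide), ih (j+1) (by omega)]
      rw [List.drop_eq_nil_of_le (by simp [List.length_take]; omega),
          List.drop_eq_nil_of_le (by simp [List.length_take]; omega)]
      simp

theorem gridStar_eq (g : List (List String)) (w : Nat) :
    ∀ i, pvGridStarA g w i = pvStarB w i (g.drop i) := by
  suffices h : ∀ n i, g.length - i = n → pvGridStarA g w i = pvStarB w i (g.drop i) from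
    fun i => h (g.length - i) i rfl
  intro n
  induction n with
  | zero =>
    intro i hi
    have hig : ¬ i < g.length := by omega
    rw [pvGridStarA, dif_neg hig, List.drop_eq_nil_of_le (by omega)]
    rfl
  | succ n ih =>
    intro i hi
    have hig : i < g.length := by omega
    rw [pvGridStarA, dif_pos hig, List.drop_eq_getElem_cons hig, pvStarB]
    have hrow : pvRowStarA (g.getD i []) w 0 = PySem.List.index? (g[i].take w) "*" := by
      rw [rowStarA_eq, PySem.List.index?_eq_idxOf?, List.getD_eq_getElem g [] hig]
      simp
    rw [hrow]
    cases PySem.List.index? (g[i].take w) "*" with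
    | some j => rfl
    | none => exact ih (i+1) (by omega)

-- grid shape
def pvRect (g : List (List String)) (X Y : Nat) : Prop :=
  g.length = X ∧ ∀ r ∈ g, r.length = Y

theorem rect_write {g : List (List String)} {X Y p q : Nat} {v : String}
    (hg : pvRect g X Y) : pvRect (pvWrite g p q v) X Y := by
  obtain ⟨h1, h2⟩ := hg
  refine ⟨by simp [pvWrite, h1], ?_⟩
  intro r hr
  rw [List.mem_iff_getElem] at hr
  obtain ⟨i, hi, hr⟩ := hr
  simp only [pvWrite, List.length_modify] at hi
  simp only [pvWrite] at hr
  rw [List.getElem_modify] at hr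
  split at hr
  · rw [← hr, List.length_set]; exact h2 _ (List.getElem_mem hi)
  · rw [← hr]; exact h2 _ (List.getElem_mem hi)


theorem cell_write {g : List (List String)} {X Y p q : Nat} (v : String)
    (hg : pvRect g X Y) (hp : p < X) (hq : q < Y) (p' q' : Nat) :
    pvCell (pvWrite g p q v) p' q' = if p' = p ∧ q' = q then v else pvCell g p' q' := by
  obtain ⟨h1, h2⟩ := hg
  have hrow : ∀ i (h : i < g.length), g[i].length = Y := fun i h => h2 _ (List.getElem_mem h)
  by_cases hp : p' = p
  · subst hp
    have hlt : p' < g.length := by omega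
    have hql : q < g[p'].length := by rw [hrow _ hlt]; omega
    by_cases hq : q' = q
    · subst hq
      simp [pvCell, pvWrite, List.getD, List.getElem?_eq_getElem hlt, hql]
    · have hq2 : ¬ (q = q') := fun h => hq h.symm
      simp [pvCell, pvWrite, List.getD, List.getElem?_eq_getElem hlt, hq, hq2]
  · have hp2 : ¬ (p = p') := fun h => hp h.symm
    simp [pvCell, pvWrite, List.getD, hp, hp2]

theorem inner_rect (src : List (List String)) (i dx dy : Nat) {X Y : Nat} (w : Nat) :
    ∀ (g : List (List String)), pvRect g X Y → i + dx < X → w + dy ≤ Y →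
      pvRect ((List.range w).foldl (fun g j => pvWrite g (i+dx) (j+dy) (pvCell src i j)) g) X Y := by
  induction w with
  | zero => intro g hg _ _; simpa using hg
  | succ n ih =>
    intro g hg hi hw
    rw [List.range_succ, List.foldl_append]
    simp only [List.foldl_cons, List.foldl_nil]
    exact rect_write (ih g hg hi (by omega))

theorem inner_cell (src : List (List String)) (i dx dy : Nat) {X Y : Nat} (w : Nat) :
    ∀ (g : List (List String)), pvRect g X Y → i + dx < X → w + dy ≤ Y → ∀ p q,
      pvCell ((List.range w).foldl (fun g j => pvWrite g (i+dx) (j+dy) (pvCell src i j)) g) p q =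
        if p = i + dx ∧ dy ≤ q ∧ q < dy + w then pvCell src i (q - dy) else pvCell g p q := by
  induction w with
  | zero =>
    intro g hg _ _ p q
    simp only [List.range_zero, List.foldl_nil]
    split_ifs with h
    · omega
    · rfl
  | succ n ih =>
    intro g hg hi hw p q
    rw [List.range_succ, List.foldl_append]
    simp only [List.foldl_cons, List.foldl_nil]
    rw [cell_write _ (inner_rect src i dx dy n g hg hi (by omega)) hi (by omega) p q]
    rw [ih g hg hi (by omega) p q]
    split_ifs <;> first
      | rfl
      | omega
      | (congr 1; omega)

theorem paint_zero (dst src : List (List String)) (w dx dy : Nat) :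
    pvPaint dst src 0 w dx dy = dst := by
  simp [pvPaint]

theorem paint_succ (dst src : List (List String)) (n w dx dy : Nat) :
    pvPaint dst src (n+1) w dx dy =
      (List.range w).foldl (fun g j => pvWrite g (n+dx) (j+dy) (pvCell src n j))
        (pvPaint dst src n w dx dy) := by
  unfold pvPaint
  rw [List.range_succ, List.foldl_append]
  simp

theorem paint_rect {dst : List (List String)} {X Y : Nat} (src : List (List String))
    (l w dx dy : Nat) (hg : pvRect dst X Y) (hl : l + dx ≤ X) (hw : w + dy ≤ Y) :
    pvRect (pvPaint dst src l w dx dy) X Y := by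
  induction l with
  | zero => rw [paint_zero]; exact hg
  | succ n ih =>
    rw [paint_succ]
    exact inner_rect src n dx dy w _ (ih (by omega)) (by omega) hw

theorem cell_paint {dst : List (List String)} {X Y : Nat} (src : List (List String))
    (l w dx dy : Nat) (hg : pvRect dst X Y) (hl : l + dx ≤ X) (hw : w + dy ≤ Y) (p q : Nat) :
    pvCell (pvPaint dst src l w dx dy) p q =
      if dx ≤ p ∧ p < dx + l ∧ dy ≤ q ∧ q < dy + w then pvCell src (p - dx) (q - dy)
      else pvCell dst p q := by
  induction l with
  | zero =>
    rw [paint_zero]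
    split_ifs with h
    · omega
    · rfl
  | succ n ih =>
    rw [paint_succ]
    rw [inner_cell src n dx dy w _
      (paint_rect src n w dx dy hg (by omega) hw) (by omega) hw p q]
    rw [ih (by omega)]
    split_ifs <;> first
      | rfl
      | omega
      | (congr 1; omega)

theorem cell_blank (X Y p q : Nat) :
    pvCell (List.replicate X (List.replicate Y ".")) p q = "." := by
  unfold pvCell
  rcases Nat.lt_or_ge p X with h | h
  · rcases Nat.lt_or_ge q Y with h2 | h2 <;>
      simp [List.getD, h, h2]
  · simp [List.getD, Nat.not_lt.mpr h]


theorem rect_blank (X Y : Nat) : pvRect (List.replicate X (List.replicate Y ".")) X Y := by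
  constructor
  · simp
  · intro r hr
    simp only [List.mem_replicate] at hr
    simp [hr.2]


-- the padded cell a reader sees after painting onto blank canvas
def pvPad (src : List (List String)) (l w dx dy p q : Nat) : String :=
  if dx ≤ p ∧ p < dx + l ∧ dy ≤ q ∧ q < dy + w then pvCell src (p - dx) (q - dy) else "."

-- the bridge: A's full-canvas comparison ↔ B's two in-place checks
theorem bridge (a b : List (List String)) (la wa lb wb x1 y1 x2 y2 : Nat) :
    ((∀ p < max (la + x2) (lb + x1), ∀ q < max (wa + y2) (wb + y1),
        pvPad a la wa x2 y2 p q = pvPad b lb wb x1 y1 p q)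
      ↔ ((∀ i < la, ∀ j < wa,
            pvCell a i j = pvOther b lb wb ((i : Int) + ((x2 : Int) - x1)) ((j : Int) + ((y2 : Int) - y1)))
        ∧ (∀ i < lb, ∀ j < wb,
            (0 ≤ (i : Int) - ((x2 : Int) - x1) ∧ (i : Int) - ((x2 : Int) - x1) < (la : Int)
              ∧ 0 ≤ (j : Int) - ((y2 : Int) - y1) ∧ (j : Int) - ((y2 : Int) - y1) < (wa : Int))
            ∨ pvCell b i j = "."))) := by
  constructor
  · intro H
    constructor
    · intro i hi j hj
      have h := H (i + x2) (by omega) (j + y2) (by omega)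
      unfold pvPad at h
      rw [if_pos (by omega)] at h
      simp only [Nat.add_sub_cancel] at h
      unfold pvOther
      split_ifs with hc
      · rw [if_pos (by omega)] at h
        rw [h]
        congr 1 <;> omega
      · rw [if_neg (by omega)] at h
        exact h
    · intro i hi j hj
      have h := H (i + x1) (by omega) (j + y1) (by omega)
      unfold pvPad at h
      rw [if_pos (by omega) (c := x1 ≤ i + x1 ∧ i + x1 < x1 + lb ∧ y1 ≤ j + y1 ∧ j + y1 < y1 + wb)] at h
      simp only [Nat.add_sub_cancel] at h
      by_cases hc : (0 ≤ (i : Int) - ((x2 : Int) - x1) ∧ (i : Int) - ((x2 : Int) - x1) < (la : Int)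
              ∧ 0 ≤ (j : Int) - ((y2 : Int) - y1) ∧ (j : Int) - ((y2 : Int) - y1) < (wa : Int))
      · exact Or.inl hc
      · refine Or.inr ?_
        rw [if_neg (by omega)] at h
        exact h.symm
  · rintro ⟨H1, H2⟩ p hp q hq
    unfold pvPad
    split_ifs with hA hB hB
    · have h := H1 (p - x2) (by omega) (q - y2) (by omega)
      unfold pvOther at h
      rw [if_pos (by omega)] at h
      rw [h]
      congr 1 <;> omega
    · have h := H1 (p - x2) (by omega) (q - y2) (by omega)
      unfold pvOther at h
      rw [if_neg (by omega)] at h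
      exact h
    · have h := H2 (p - x1) (by omega) (q - y1) (by omega)
      rcases h with hc | hc
      · exfalso; omega
      · exact hc.symm
    · rfl

theorem main_eq (a b : List (List String)) : is_equal_draw a b = is_equal_draw_alt a b := by
  unfold is_equal_draw is_equal_draw_alt
  dsimp only
  rw [gridStar_eq a ((a.getD 0 []).length) 0, gridStar_eq b ((b.getD 0 []).length) 0]
  simp only [List.drop_zero]
  set wa := (a.getD 0 []).length with hwa
  set wb := (b.getD 0 []).length with hwb
  set s1 := pvStarB wa 0 a with hs1
  set s2 := pvStarB wb 0 b with hs2
  set X := max (a.length + s2.1) (b.length + s1.1) with hX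
  set Y := max (wa + s2.2) (wb + s1.2) with hY
  have hcA : ∀ p q, pvCell (pvPaint (List.replicate X (List.replicate Y ".")) a a.length wa s2.1 s2.2) p q
      = pvPad a a.length wa s2.1 s2.2 p q := by
    intro p q
    rw [cell_paint a a.length wa s2.1 s2.2 (rect_blank X Y) (by omega) (by omega) p q]
    unfold pvPad
    split_ifs with h
    · rfl
    · exact cell_blank X Y p q
  have hcB : ∀ p q, pvCell (pvPaint (List.replicate X (List.replicate Y ".")) b b.length wb s1.1 s1.2) p q
      = pvPad b b.length wb s1.1 s1.2 p q := by
    intro p q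
    rw [cell_paint b b.length wb s1.1 s1.2 (rect_blank X Y) (by omega) (by omega) p q]
    unfold pvPad
    split_ifs with h
    · rfl
    · exact cell_blank X Y p q
  have hbr := bridge a b a.length wa b.length wb s1.1 s1.2 s2.1 s2.2
  rw [← hX, ← hY] at hbr
  have hcond : ((List.range X).all (fun i => (List.range Y).all (fun j =>
        pvCell (pvPaint (List.replicate X (List.replicate Y ".")) a a.length wa s2.1 s2.2) i j
          == pvCell (pvPaint (List.replicate X (List.replicate Y ".")) b b.length wb s1.1 s1.2) i j)))
      = (((List.range a.length).all (fun i => (List.range wa).all (fun j =>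
            pvCell a i j == pvOther b b.length wb ((i : Int) + ((s2.1 : Int) - (s1.1 : Int))) ((j : Int) + ((s2.2 : Int) - (s1.2 : Int))))))
          && (List.range b.length).all (fun i => (List.range wb).all (fun j =>
            decide (0 ≤ (i : Int) - ((s2.1 : Int) - (s1.1 : Int)) ∧ (i : Int) - ((s2.1 : Int) - (s1.1 : Int)) < (a.length : Int)
              ∧ 0 ≤ (j : Int) - ((s2.2 : Int) - (s1.2 : Int)) ∧ (j : Int) - ((s2.2 : Int) - (s1.2 : Int)) < (wa : Int))
            || (pvCell b i j == ".")))) := by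
    rw [Bool.eq_iff_iff]
    simp only [List.all_eq_true, List.mem_range, beq_iff_eq, Bool.and_eq_true, Bool.or_eq_true,
      decide_eq_true_eq, hcA, hcB]
    exact hbr
  rw [hcond]

-- ===== VERDICT (by name: the statement is the Claim_ definition above) =====
theorem is_equal_draw_spec : Claim_equal_is_equal_draw := by
  intro a b _hDom _hPre
  show is_equal_draw a b = is_equal_draw_alt a b
  exact main_eq a b
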